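-- pv_equiv track=rewrite | github.com/MohammadaminKafi/text2sql-agent | src/components/utils/date_utils.py | _unique_dd_mm_sorted
-- ===== SOURCE A (Python) =====
-- from typing import Optional, Tuple, Dict, Any, List, Iterable
--
-- def _fmt_dd_mm(d: int, m: int) -> str:
--     return f"{d:02d}-{m:02d}"
--
-- def _unique_dd_mm_sorted(mmdd: Iterable[Tuple[int, int]]) -> List[str]:
--     seen, items = set(), []
--     for m, d in mmdd:
--         if (m, d) not in seen:
--             seen.add((m, d))
--             items.append((m, d))
--     items.sort()
--     return [_fmt_dd_mm(d, m) for m, d in items]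
-- ===== SOURCE B (Python) =====
-- from typing import Tuple, List, Iterable
--
-- def _fmt_dd_mm(d: int, m: int) -> str:
--     return f"{d:02d}-{m:02d}"
--
-- def _unique_dd_mm_sorted(mmdd: Iterable[Tuple[int, int]]) -> List[str]:
--     # sort first, then dedup by adjacency: the only state is the last-seen pair
--     out: List[str] = []
--     prev = None
--     for m, d in sorted(mmdd):
--         if (m, d) != prev:
--             out.append(_fmt_dd_mm(d, m))
--             prev = (m, d)
--     return out
-- ===== Notes on version B (the rewrite author's own statement) =====
-- stated objective: alternative
-- what changed: B replaces A's hash-set dedup-before-sort (set + items list) with sort-first then a single adjacency-dedup pass whose only state is the last-seen pair.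
import Mathlib
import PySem

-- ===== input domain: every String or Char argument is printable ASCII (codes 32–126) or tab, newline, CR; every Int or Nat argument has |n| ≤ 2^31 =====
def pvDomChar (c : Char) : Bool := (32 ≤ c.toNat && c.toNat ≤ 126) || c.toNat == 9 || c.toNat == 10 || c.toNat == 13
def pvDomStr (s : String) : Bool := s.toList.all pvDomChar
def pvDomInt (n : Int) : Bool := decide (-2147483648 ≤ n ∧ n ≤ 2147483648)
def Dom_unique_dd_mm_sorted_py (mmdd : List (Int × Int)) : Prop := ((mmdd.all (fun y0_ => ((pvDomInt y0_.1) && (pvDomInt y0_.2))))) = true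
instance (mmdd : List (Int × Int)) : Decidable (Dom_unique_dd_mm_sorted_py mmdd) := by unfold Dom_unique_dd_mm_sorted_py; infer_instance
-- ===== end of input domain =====

-- B sorts the pairs first and removes duplicates by adjacency with a single 'previous' variable,
-- instead of A's hash-set dedup before sorting; objective: alternative (same asymptotic cost).


-- ===== PORT A =====
-- _fmt_dd_mm(d, m) = f"{d:02d}-{m:02d}"; the zero-pad of width 2 pads exactly the one-character
-- renderings (single digits 0..9), which is what the 'if length < 2' branch does — exact on all ints.
def pvPad2 (n : Int) : List Char :=
  let cs := PySem.Int.toChars n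
  if cs.length < 2 then '0' :: cs else cs

def pvFmt (d m : Int) : String := String.ofList (pvPad2 d ++ '-' :: pvPad2 m)

-- the body of A's dedup loop: 'if (m, d) not in seen: seen.add((m, d)); items.append((m, d))'
def pvStepA (st : PySem.Set (Int × Int) × List (Int × Int)) (p : Int × Int) :
    PySem.Set (Int × Int) × List (Int × Int) :=
  if PySem.Set.contains st.1 p then st else (PySem.Set.add st.1 p, st.2 ++ [p])

def unique_dd_mm_sorted_py (mmdd : List (Int × Int)) : List String :=
  let st := mmdd.foldl pvStepA (PySem.Set.empty, [])
  (PySem.List.sorted2 st.2 (fun x => x.1) (fun x => x.2) false).map (fun p => pvFmt p.2 p.1)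

-- ===== PORT B =====
def unique_dd_mm_sorted_py_alt (mmdd : List (Int × Int)) : List String :=
  ((PySem.List.sorted2 mmdd (fun x => x.1) (fun x => x.2) false).foldl
    (fun (st : List String × Option (Int × Int)) p =>
      if some p = st.2 then st else (st.1 ++ [pvFmt p.2 p.1], some p))
    ([], none)).1

-- ===== PRECONDITION & SPEC =====
def Spec_unique_dd_mm_sorted_py (mmdd : List (Int × Int)) (out : List String) : Prop := out = unique_dd_mm_sorted_py_alt mmdd
instance (mmdd : List (Int × Int)) (out : List String) : Decidable (Spec_unique_dd_mm_sorted_py mmdd out) := by unfold Spec_unique_dd_mm_sorted_py; infer_instance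

-- ===== CLAIM (what is proved, stated in full; the proofs are below) =====
def Claim_equal_unique_dd_mm_sorted_py : Prop := ∀ (mmdd : List (Int × Int)), Dom_unique_dd_mm_sorted_py mmdd → Spec_unique_dd_mm_sorted_py mmdd (unique_dd_mm_sorted_py mmdd)

-- ===== LEMMAS AND PROOFS =====

-- Lexicographic strict order on Int pairs (Python tuple comparison).
def pvLexLt (a b : Int × Int) : Prop := a.1 < b.1 ∨ (a.1 = b.1 ∧ a.2 < b.2)

def pvLexLe (a b : Int × Int) : Prop := ¬ pvLexLt b a

-- the concrete 'before' function sorted2 uses with these keys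
def pvBef (a b : Int × Int) : Bool :=
  decide (a.1 < b.1) || (!decide (b.1 < a.1) && decide (a.2 < b.2))

lemma pvBef_iff (a b : Int × Int) : pvBef a b = true ↔ pvLexLt a b := by
  simp only [pvBef, pvLexLt, Bool.or_eq_true, Bool.and_eq_true, Bool.not_eq_eq_eq_not,
    Bool.not_true, decide_eq_true_eq, decide_eq_false_iff_not]
  omega

lemma pvLex_asymm {a b : Int × Int} (h : pvLexLt a b) : pvLexLe a b := by
  simp only [pvLexLt, pvLexLe] at *; omega

lemma pvLex_lt_of_le_of_ne {a b : Int × Int} (h : pvLexLe a b) (hne : a ≠ b) : pvLexLt a b := by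
  rcases a with ⟨a1, a2⟩; rcases b with ⟨b1, b2⟩
  simp only [pvLexLt, pvLexLe, ne_eq, Prod.mk.injEq, not_and] at *
  omega

lemma pvLex_lt_of_lt_of_le {a b c : Int × Int} (h1 : pvLexLt a b) (h2 : pvLexLe b c) : pvLexLt a c := by
  simp only [pvLexLt, pvLexLe] at *; omega

lemma pvLex_le_antisymm {a b : Int × Int} (h1 : pvLexLe a b) (h2 : pvLexLe b a) : a = b := by
  rcases a with ⟨a1, a2⟩; rcases b with ⟨b1, b2⟩
  simp only [pvLexLt, pvLexLe, Prod.mk.injEq] at *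
  omega

lemma pvLex_ne_of_lt {a b : Int × Int} (h : pvLexLt a b) : a ≠ b := by
  rintro rfl; simp only [pvLexLt] at h; omega

-- insertBy with pvBef keeps Pairwise pvLexLe
lemma pv_insertBy_pairwise (x : Int × Int) :
    ∀ (acc : List (Int × Int)), acc.Pairwise pvLexLe →
      (PySem.List.insertBy pvBef x acc).Pairwise pvLexLe := by
  intro acc
  induction acc with
  | nil => intro _; simp [PySem.List.insertBy]
  | cons y ys ih =>
    intro hp
    rw [List.pairwise_cons] at hp
    obtain ⟨hy, hys⟩ := hp
    simp only [PySem.List.insertBy]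
    by_cases hb : pvBef x y = true
    · simp only [hb, if_true]
      refine List.Pairwise.cons ?_ (List.Pairwise.cons hy hys)
      intro z hz
      rcases List.mem_cons.mp hz with rfl | hz
      · exact pvLex_asymm ((pvBef_iff x z).mp hb)
      · exact pvLex_asymm (pvLex_lt_of_lt_of_le ((pvBef_iff x y).mp hb) (hy z hz))
    · simp only [hb]
      refine List.Pairwise.cons ?_ (ih hys)
      intro z hz
      rcases (PySem.List.mem_insertBy pvBef x z ys).mp hz with heq | hz
      · subst heq
        intro hlt
        exact hb ((pvBef_iff z y).mpr hlt)
      · exact hy z hz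

-- sorted2 with these keys is pairwise pvLexLe
lemma pv_sorted2_pairwise (xs : List (Int × Int)) :
    (PySem.List.sorted2 xs (fun x => x.1) (fun x => x.2) false).Pairwise pvLexLe := by
  have hrw : PySem.List.sorted2 xs (fun x => x.1) (fun x => x.2) false
        = xs.foldl (fun acc x => PySem.List.insertBy pvBef x acc) [] := rfl
  rw [hrw]
  suffices h : ∀ (ys : List (Int × Int)) (acc : List (Int × Int)), acc.Pairwise pvLexLe →
      (ys.foldl (fun acc x => PySem.List.insertBy pvBef x acc) acc).Pairwise pvLexLe by
    exact h xs [] (by simp)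
  intro ys
  induction ys with
  | nil => intro acc h; simpa using h
  | cons y t ih => intro acc h; exact ih _ (pv_insertBy_pairwise y acc h)

-- A's loop: the items accumulator is a nodup list with the same members as the input
lemma pvFoldA_inv : ∀ (xs : List (Int × Int)) (s : PySem.Set (Int × Int)) (l : List (Int × Int)),
    (∀ p, p ∈ s ↔ p ∈ l) → l.Nodup →
    (∀ p, p ∈ (xs.foldl pvStepA (s, l)).2 ↔ p ∈ l ∨ p ∈ xs) ∧ (xs.foldl pvStepA (s, l)).2.Nodup := by
  intro xs
  induction xs with
  | nil =>
    intro s l hs hn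
    exact ⟨fun p => by simp, hn⟩
  | cons x t ih =>
    intro s l hs hn
    simp only [List.foldl_cons]
    by_cases hx : x ∈ s
    · have hstep : pvStepA (s, l) x = (s, l) := by
        unfold pvStepA
        rw [if_pos ((PySem.Set.contains_iff s x).mpr hx)]
      rw [hstep]
      obtain ⟨hmem, hnd⟩ := ih s l hs hn
      refine ⟨fun p => ?_, hnd⟩
      rw [hmem p]
      have hxl : x ∈ l := (hs x).mp hx
      simp only [List.mem_cons]
      constructor
      · rintro (h | h)
        · exact Or.inl h
        · exact Or.inr (Or.inr h)
      · rintro (h | rfl | h)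
        · exact Or.inl h
        · exact Or.inl hxl
        · exact Or.inr h
    · have hstep : pvStepA (s, l) x = (PySem.Set.add s x, l ++ [x]) := by
        unfold pvStepA
        rw [if_neg (fun hc => hx ((PySem.Set.contains_iff s x).mp hc))]
      rw [hstep]
      have hxl : x ∉ l := fun h => hx ((hs x).mpr h)
      have hs' : ∀ p, p ∈ PySem.Set.add s x ↔ p ∈ l ++ [x] := by
        intro p
        rw [PySem.Set.mem_add, List.mem_append, List.mem_singleton, hs p]
      have hn' : (l ++ [x]).Nodup := by
        rw [List.nodup_append]
        refine ⟨hn, List.nodup_singleton x, ?_⟩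
        intro a ha b hb
        rcases List.mem_singleton.mp hb with rfl
        exact fun he => hxl (he ▸ ha)
      obtain ⟨hmem, hnd⟩ := ih _ _ hs' hn'
      refine ⟨fun p => ?_, hnd⟩
      rw [hmem p]
      simp only [List.mem_append, List.mem_cons]
      tauto

-- B's loop: lift the string-building fold to the adjacent dedup of the pair list
def pvAdj : Option (Int × Int) → List (Int × Int) → List (Int × Int)
  | _, [] => []
  | prev, p :: t => if some p = prev then pvAdj prev t else p :: pvAdj (some p) t

lemma pvFoldB_eq : ∀ (L : List (Int × Int)) (out : List String) (prev : Option (Int × Int)),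
    (L.foldl (fun (st : List String × Option (Int × Int)) p =>
        if some p = st.2 then st else (st.1 ++ [pvFmt p.2 p.1], some p)) (out, prev)).1
      = out ++ (pvAdj prev L).map (fun p => pvFmt p.2 p.1) := by
  intro L
  induction L with
  | nil => intro out prev; simp [pvAdj]
  | cons x t ih =>
    intro out prev
    simp only [List.foldl_cons, pvAdj]
    by_cases h : some x = prev
    · simp [h, ih]
    · simp [h, ih]

lemma pvAdj_spec : ∀ (L : List (Int × Int)) (prev : Option (Int × Int)),
    L.Pairwise pvLexLe → (∀ p, prev = some p → ∀ y ∈ L, pvLexLe p y) →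
    (pvAdj prev L).Pairwise pvLexLt ∧ (∀ z, z ∈ pvAdj prev L ↔ z ∈ L ∧ some z ≠ prev) := by
  intro L
  induction L with
  | nil => intro prev _ _; simp [pvAdj]
  | cons x t ih =>
    intro prev hp hb
    rw [List.pairwise_cons] at hp
    obtain ⟨hx, ht⟩ := hp
    simp only [pvAdj]
    by_cases h : some x = prev
    · simp only [h, if_true]
      have hb' : ∀ p, prev = some p → ∀ y ∈ t, pvLexLe p y := by
        rintro p rfl y hy
        have hpx : p = x := by injection h.symm
        subst hpx
        exact hx y hy
      obtain ⟨h1, h2⟩ := ih prev ht hb'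
      refine ⟨h1, fun z => ?_⟩
      rw [h2 z]
      simp only [List.mem_cons]
      constructor
      · rintro ⟨hz, hne⟩
        exact ⟨Or.inr hz, hne⟩
      · rintro ⟨rfl | hz, hne⟩
        · exact absurd h hne
        · exact ⟨hz, hne⟩
    · simp only [h, if_false]
      have hb' : ∀ p, some x = some p → ∀ y ∈ t, pvLexLe p y := by
        rintro p hpx y hy
        have hxp : x = p := by injection hpx
        subst hxp
        exact hx y hy
      obtain ⟨h1, h2⟩ := ih (some x) ht hb'
      constructor
      · refine List.Pairwise.cons ?_ h1
        intro z hz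
        obtain ⟨hzt, hzx⟩ := (h2 z).mp hz
        have hne : x ≠ z := fun he => hzx (by rw [he])
        exact pvLex_lt_of_le_of_ne (hx z hzt) hne
      · intro z
        simp only [List.mem_cons, h2 z]
        constructor
        · rintro (rfl | ⟨hz, hzx⟩)
          · exact ⟨Or.inl rfl, h⟩
          · refine ⟨Or.inr hz, ?_⟩
            intro hzp
            rcases prev with _ | p
            · simp at hzp
            · have hzp' : z = p := by injection hzp
              subst hzp'
              have hb1 : pvLexLe z x := hb z rfl x (List.mem_cons_self ..)
              have hb2 : pvLexLe x z := hx z hz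
              exact h (by rw [pvLex_le_antisymm hb2 hb1])
        · rintro ⟨rfl | hz, hne⟩
          · exact Or.inl rfl
          · by_cases hzx : z = x
            · exact Or.inl hzx
            · exact Or.inr ⟨hz, fun he => hzx (by injection he)⟩

lemma pv_pairwise_lt_of_le_nodup {L : List (Int × Int)} (hle : L.Pairwise pvLexLe)
    (hnd : L.Nodup) : L.Pairwise pvLexLt :=
  (List.Pairwise.and hle hnd).imp (fun h => pvLex_lt_of_le_of_ne h.1 h.2)

lemma pv_nodup_of_pairwise_lt {L : List (Int × Int)} (h : L.Pairwise pvLexLt) : L.Nodup :=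
  h.imp (fun h => pvLex_ne_of_lt h)

-- ===== VERDICT (by name: the statement is the Claim_ definition above) =====
theorem unique_dd_mm_sorted_py_spec : Claim_equal_unique_dd_mm_sorted_py := by
  intro mmdd _
  unfold Spec_unique_dd_mm_sorted_py unique_dd_mm_sorted_py unique_dd_mm_sorted_py_alt
  rw [pvFoldB_eq]
  simp only [List.nil_append]
  have hfold := pvFoldA_inv mmdd PySem.Set.empty []
    (by intro p; simp [PySem.Set.empty]) (by simp)
  set items := (mmdd.foldl pvStepA (PySem.Set.empty, [])).2 with hitems
  obtain ⟨hmemA, hndA⟩ := hfold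
  set LA := PySem.List.sorted2 items (fun x => x.1) (fun x => x.2) false with hLA
  set LS := PySem.List.sorted2 mmdd (fun x => x.1) (fun x => x.2) false with hLS
  have hpermA : LA.Perm items := PySem.List.sorted2_perm ..
  have hLAlt : LA.Pairwise pvLexLt :=
    pv_pairwise_lt_of_le_nodup (pv_sorted2_pairwise items) (hpermA.nodup_iff.mpr hndA)
  have hpermS : LS.Perm mmdd := PySem.List.sorted2_perm ..
  obtain ⟨hBlt, hBmem⟩ := pvAdj_spec LS none (pv_sorted2_pairwise mmdd) (by rintro p ⟨⟩)
  have hmain : LA = pvAdj none LS := by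
    have hnd1 : LA.Nodup := pv_nodup_of_pairwise_lt hLAlt
    have hnd2 : (pvAdj none LS).Nodup := pv_nodup_of_pairwise_lt hBlt
    have hperm : LA.Perm (pvAdj none LS) := by
      rw [List.perm_ext_iff_of_nodup hnd1 hnd2]
      intro a
      rw [hBmem a]
      constructor
      · intro h
        have := (hmemA a).mp (hpermA.mem_iff.mp h)
        simp only [List.not_mem_nil, false_or] at this
        exact ⟨hpermS.mem_iff.mpr this, by simp⟩
      · rintro ⟨h, -⟩
        exact hpermA.mem_iff.mpr ((hmemA a).mpr (Or.inr (hpermS.mem_iff.mp h)))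
    exact hperm.eq_of_pairwise
      (fun a b _ _ h1 h2 => pvLex_le_antisymm (pvLex_asymm h1) (pvLex_asymm h2))
      hLAlt hBlt
  rw [hmain]
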